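-- pv_equiv track=rewrite | github.com/pradigmaz/platform_help_teacher | backend/app/utils/file_validation.py | _are_mime_equivalent
-- ===== SOURCE A (Python) =====
-- def _are_mime_equivalent(mime1: str, mime2: str) -> bool:
--     """Проверяет эквивалентность MIME типов."""
--     equivalents = [
--         {'image/jpeg', 'image/jpg'},
--         {'application/zip', 'application/x-zip-compressed'},
--         {'text/plain', 'text/x-python', 'text/x-script.python'},
--     ]
--     for group in equivalents:
--         if mime1 in group and mime2 in group:
--             return True
--     return False
-- ===== SOURCE B (Python) =====
-- # B: precomputed mime -> group-id dict; two lookups with a None guard instead of scanning the groups.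
-- _MIME_GROUP = {
--     'image/jpeg': 0, 'image/jpg': 0,
--     'application/zip': 1, 'application/x-zip-compressed': 1,
--     'text/plain': 2, 'text/x-python': 2, 'text/x-script.python': 2,
-- }
--
-- def _are_mime_equivalent(mime1: str, mime2: str) -> bool:
--     g1 = _MIME_GROUP.get(mime1)
--     return g1 is not None and g1 == _MIME_GROUP.get(mime2)
-- ===== Notes on version B (the rewrite author's own statement) =====
-- stated objective: idiomatic
-- what changed: Replaces the per-call scan over a list of equivalence sets with a precomputed mime->group-id dict and two guarded lookups.
import Mathlib
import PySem

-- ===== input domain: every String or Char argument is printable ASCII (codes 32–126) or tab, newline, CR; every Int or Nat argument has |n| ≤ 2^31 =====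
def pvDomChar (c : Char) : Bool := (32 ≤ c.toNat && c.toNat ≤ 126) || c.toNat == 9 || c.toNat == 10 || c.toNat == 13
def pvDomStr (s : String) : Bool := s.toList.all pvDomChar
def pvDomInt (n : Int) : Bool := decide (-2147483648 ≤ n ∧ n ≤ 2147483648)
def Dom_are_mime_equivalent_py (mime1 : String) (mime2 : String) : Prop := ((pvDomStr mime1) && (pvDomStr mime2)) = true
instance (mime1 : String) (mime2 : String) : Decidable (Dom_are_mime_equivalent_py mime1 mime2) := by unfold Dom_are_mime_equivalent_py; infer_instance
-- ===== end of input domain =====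

-- B replaces A's per-call scan over equivalence sets with a precomputed mime->group-id dict (idiomatic).


-- ===== PORT A =====
-- groups of equivalent MIME types, and the loop returning True on the first group containing both
def pvGroups : List (PySem.Set String) :=
  [PySem.Set.ofList ["image/jpeg", "image/jpg"],
   PySem.Set.ofList ["application/zip", "application/x-zip-compressed"],
   PySem.Set.ofList ["text/plain", "text/x-python", "text/x-script.python"]]

def pvLoopA (mime1 : String) (mime2 : String) : List (PySem.Set String) → Bool
  | [] => false
  | group :: rest =>
    if PySem.Set.contains group mime1 && PySem.Set.contains group mime2 then true
    else pvLoopA mime1 mime2 rest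

def are_mime_equivalent_py (mime1 : String) (mime2 : String) : Bool :=
  pvLoopA mime1 mime2 pvGroups

-- ===== PORT B =====
-- precomputed mime -> group-id dict; two guarded lookups
def pvCanon : PySem.Dict String Int :=
  PySem.Dict.ofList
    [("image/jpeg", 0), ("image/jpg", 0),
     ("application/zip", 1), ("application/x-zip-compressed", 1),
     ("text/plain", 2), ("text/x-python", 2), ("text/x-script.python", 2)]

def are_mime_equivalent_py_alt (mime1 : String) (mime2 : String) : Bool :=
  let g1 := PySem.Dict.get? pvCanon mime1
  g1.isSome && (g1 == PySem.Dict.get? pvCanon mime2)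

-- ===== PRECONDITION & SPEC =====
def Spec_are_mime_equivalent_py (mime1 : String) (mime2 : String) (out : Bool) : Prop := out = are_mime_equivalent_py_alt mime1 mime2
instance (mime1 : String) (mime2 : String) (out : Bool) : Decidable (Spec_are_mime_equivalent_py mime1 mime2 out) := by unfold Spec_are_mime_equivalent_py; infer_instance

-- ===== CLAIM (what is proved, stated in full; the proofs are below) =====
def Claim_equal_are_mime_equivalent_py : Prop := ∀ (mime1 : String) (mime2 : String), Dom_are_mime_equivalent_py mime1 mime2 → Spec_are_mime_equivalent_py mime1 mime2 (are_mime_equivalent_py mime1 mime2)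

-- ===== LEMMAS AND PROOFS =====
lemma canon_get_unknown (m : String) (h0 : m ≠ "image/jpeg") (h1 : m ≠ "image/jpg") (h2 : m ≠ "application/zip") (h3 : m ≠ "application/x-zip-compressed") (h4 : m ≠ "text/plain") (h5 : m ≠ "text/x-python") (h6 : m ≠ "text/x-script.python") :
    PySem.Dict.get? pvCanon m = none := by
  have hk : pvCanon.keys = ["image/jpeg", "image/jpg", "application/zip", "application/x-zip-compressed", "text/plain", "text/x-python", "text/x-script.python"] := by decide
  refine (PySem.Dict.get?_eq_none_iff_not_mem_keys _ _).mpr ?_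
  rw [hk]; simp [h0, h1, h2, h3, h4, h5, h6]

theorem pv_key (mime1 mime2 : String) : are_mime_equivalent_py mime1 mime2 = are_mime_equivalent_py_alt mime1 mime2 := by
  by_cases h0 : mime1 = "image/jpeg"
  · subst h0
    by_cases k0 : mime2 = "image/jpeg"
    · subst k0; decide
    by_cases k1 : mime2 = "image/jpg"
    · subst k1; decide
    by_cases k2 : mime2 = "application/zip"
    · subst k2; decide
    by_cases k3 : mime2 = "application/x-zip-compressed"
    · subst k3; decide
    by_cases k4 : mime2 = "text/plain"
    · subst k4; decide
    by_cases k5 : mime2 = "text/x-python"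
    · subst k5; decide
    by_cases k6 : mime2 = "text/x-script.python"
    · subst k6; decide
    simp [are_mime_equivalent_py, are_mime_equivalent_py_alt, pvLoopA, pvGroups, PySem.Set.contains, PySem.Set.ofList, PySem.Set.add, k0, k1, k2, k3, k4, k5, k6, canon_get_unknown mime2 k0 k1 k2 k3 k4 k5 k6]
  by_cases h1 : mime1 = "image/jpg"
  · subst h1
    by_cases k0 : mime2 = "image/jpeg"
    · subst k0; decide
    by_cases k1 : mime2 = "image/jpg"
    · subst k1; decide
    by_cases k2 : mime2 = "application/zip"
    · subst k2; decide
    by_cases k3 : mime2 = "application/x-zip-compressed"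
    · subst k3; decide
    by_cases k4 : mime2 = "text/plain"
    · subst k4; decide
    by_cases k5 : mime2 = "text/x-python"
    · subst k5; decide
    by_cases k6 : mime2 = "text/x-script.python"
    · subst k6; decide
    simp [are_mime_equivalent_py, are_mime_equivalent_py_alt, pvLoopA, pvGroups, PySem.Set.contains, PySem.Set.ofList, PySem.Set.add, k0, k1, k2, k3, k4, k5, k6, canon_get_unknown mime2 k0 k1 k2 k3 k4 k5 k6]
  by_cases h2 : mime1 = "application/zip"
  · subst h2
    by_cases k0 : mime2 = "image/jpeg"
    · subst k0; decide
    by_cases k1 : mime2 = "image/jpg"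
    · subst k1; decide
    by_cases k2 : mime2 = "application/zip"
    · subst k2; decide
    by_cases k3 : mime2 = "application/x-zip-compressed"
    · subst k3; decide
    by_cases k4 : mime2 = "text/plain"
    · subst k4; decide
    by_cases k5 : mime2 = "text/x-python"
    · subst k5; decide
    by_cases k6 : mime2 = "text/x-script.python"
    · subst k6; decide
    simp [are_mime_equivalent_py, are_mime_equivalent_py_alt, pvLoopA, pvGroups, PySem.Set.contains, PySem.Set.ofList, PySem.Set.add, k0, k1, k2, k3, k4, k5, k6, canon_get_unknown mime2 k0 k1 k2 k3 k4 k5 k6]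
  by_cases h3 : mime1 = "application/x-zip-compressed"
  · subst h3
    by_cases k0 : mime2 = "image/jpeg"
    · subst k0; decide
    by_cases k1 : mime2 = "image/jpg"
    · subst k1; decide
    by_cases k2 : mime2 = "application/zip"
    · subst k2; decide
    by_cases k3 : mime2 = "application/x-zip-compressed"
    · subst k3; decide
    by_cases k4 : mime2 = "text/plain"
    · subst k4; decide
    by_cases k5 : mime2 = "text/x-python"
    · subst k5; decide
    by_cases k6 : mime2 = "text/x-script.python"
    · subst k6; decide
    simp [are_mime_equivalent_py, are_mime_equivalent_py_alt, pvLoopA, pvGroups, PySem.Set.contains, PySem.Set.ofList, PySem.Set.add, k0, k1, k2, k3, k4, k5, k6, canon_get_unknown mime2 k0 k1 k2 k3 k4 k5 k6]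
  by_cases h4 : mime1 = "text/plain"
  · subst h4
    by_cases k0 : mime2 = "image/jpeg"
    · subst k0; decide
    by_cases k1 : mime2 = "image/jpg"
    · subst k1; decide
    by_cases k2 : mime2 = "application/zip"
    · subst k2; decide
    by_cases k3 : mime2 = "application/x-zip-compressed"
    · subst k3; decide
    by_cases k4 : mime2 = "text/plain"
    · subst k4; decide
    by_cases k5 : mime2 = "text/x-python"
    · subst k5; decide
    by_cases k6 : mime2 = "text/x-script.python"
    · subst k6; decide
    simp [are_mime_equivalent_py, are_mime_equivalent_py_alt, pvLoopA, pvGroups, PySem.Set.contains, PySem.Set.ofList, PySem.Set.add, k0, k1, k2, k3, k4, k5, k6, canon_get_unknown mime2 k0 k1 k2 k3 k4 k5 k6]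
  by_cases h5 : mime1 = "text/x-python"
  · subst h5
    by_cases k0 : mime2 = "image/jpeg"
    · subst k0; decide
    by_cases k1 : mime2 = "image/jpg"
    · subst k1; decide
    by_cases k2 : mime2 = "application/zip"
    · subst k2; decide
    by_cases k3 : mime2 = "application/x-zip-compressed"
    · subst k3; decide
    by_cases k4 : mime2 = "text/plain"
    · subst k4; decide
    by_cases k5 : mime2 = "text/x-python"
    · subst k5; decide
    by_cases k6 : mime2 = "text/x-script.python"
    · subst k6; decide
    simp [are_mime_equivalent_py, are_mime_equivalent_py_alt, pvLoopA, pvGroups, PySem.Set.contains, PySem.Set.ofList, PySem.Set.add, k0, k1, k2, k3, k4, k5, k6, canon_get_unknown mime2 k0 k1 k2 k3 k4 k5 k6]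
  by_cases h6 : mime1 = "text/x-script.python"
  · subst h6
    by_cases k0 : mime2 = "image/jpeg"
    · subst k0; decide
    by_cases k1 : mime2 = "image/jpg"
    · subst k1; decide
    by_cases k2 : mime2 = "application/zip"
    · subst k2; decide
    by_cases k3 : mime2 = "application/x-zip-compressed"
    · subst k3; decide
    by_cases k4 : mime2 = "text/plain"
    · subst k4; decide
    by_cases k5 : mime2 = "text/x-python"
    · subst k5; decide
    by_cases k6 : mime2 = "text/x-script.python"
    · subst k6; decide
    simp [are_mime_equivalent_py, are_mime_equivalent_py_alt, pvLoopA, pvGroups, PySem.Set.contains, PySem.Set.ofList, PySem.Set.add, k0, k1, k2, k3, k4, k5, k6, canon_get_unknown mime2 k0 k1 k2 k3 k4 k5 k6]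
  simp [are_mime_equivalent_py, are_mime_equivalent_py_alt, pvLoopA, pvGroups, PySem.Set.contains, PySem.Set.ofList, PySem.Set.add, h0, h1, h2, h3, h4, h5, h6, canon_get_unknown mime1 h0 h1 h2 h3 h4 h5 h6]

-- ===== VERDICT (by name: the statement is the Claim_ definition above) =====
theorem are_mime_equivalent_py_spec : Claim_equal_are_mime_equivalent_py := by
  intro mime1 mime2 _
  unfold Spec_are_mime_equivalent_py
  exact pv_key mime1 mime2
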